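-- pv_equiv track=rewrite | github.com/JinSakuma/timing-single | experiments/src/datasets/timing_dataset.py | transcripts_to_labels
-- ===== SOURCE A (Python) =====
-- VOCAB = [' ',"'",'~','-','.','<','>','[',']','U','N','K','a','b','c','d','e','f','g',
--          'h','i','j','k','l','m','n','o','p','q','r','s','t','u','v',
--          'w','x','y','z']
--
-- SILENT_VOCAB = ['[baby]', '[ringing]', '[laughter]', '[kids]', '[music]',
--                 '[noise]', '[unintelligible]', '[dogs]', '[cough]']
--
-- def transcripts_to_labels(transcripts_list):
--     """Converts transcript texts to sequences of vocab indices for characters."""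
--     transcript_labels = []
--     for transcripts in transcripts_list:
--         transcript_label = []
--         for transcript in transcripts:
--             words = transcript.split()
--             labels = []
--             for i in range(len(words)):
--                 word = words[i]
--                 if word in SILENT_VOCAB:
--                     # silent vocab builds on top of vocab
--                     label = SILENT_VOCAB.index(word) + len(VOCAB)
--                     labels.append(label)
--                 else:
--                     chars = list(word)
--                     labels.extend([VOCAB.index(ch) for ch in chars])
--                 # add a space in between words
--                 labels.append(VOCAB.index(' '))
--             labels = labels[:-1]  # remove last space
--             transcript_label.append(labels)
--
--         transcript_labels.append(transcript_label)
--     return transcript_labels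
-- ===== SOURCE B (Python) =====
-- VOCAB = [' ',"'",'~','-','.','<','>','[',']','U','N','K','a','b','c','d','e','f','g',
--          'h','i','j','k','l','m','n','o','p','q','r','s','t','u','v',
--          'w','x','y','z']
--
-- SILENT_VOCAB = ['[baby]', '[ringing]', '[laughter]', '[kids]', '[music]',
--                 '[noise]', '[unintelligible]', '[dogs]', '[cough]']
--
--
-- def _encode_word(word):
--     """Index segment for one word: a single silent-vocab token, or one index per char."""
--     if word in SILENT_VOCAB:
--         return [SILENT_VOCAB.index(word) + len(VOCAB)]
--     return [VOCAB.index(ch) for ch in word]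
--
--
-- def transcripts_to_labels(transcripts_list):
--     """Converts transcript texts to sequences of vocab indices for characters.
--
--     Streaming tokenizer: one pass over the raw characters of each transcript,
--     buffering the current word and emitting its indices at each whitespace
--     boundary, with the space index emitted only between words (never trimmed).
--     No str.split() and no labels[:-1].
--     """
--     space = VOCAB.index(' ')
--     result = []
--     for transcripts in transcripts_list:
--         row = []
--         for transcript in transcripts:
--             labels = []
--             cur = []
--             first = True
--             for ch in transcript:
--                 if ch.isspace():
--                     if cur:
--                         if not first:
--                             labels.append(space)
--                         labels.extend(_encode_word(''.join(cur)))
--                         first = False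
--                         cur = []
--                 else:
--                     cur.append(ch)
--             if cur:
--                 if not first:
--                     labels.append(space)
--                 labels.extend(_encode_word(''.join(cur)))
--             row.append(labels)
--         result.append(row)
--     return result
-- ===== Notes on version B (the rewrite author's own statement) =====
-- stated objective: alternative
-- what changed: B replaces A's split-then-encode-then-trim pipeline with a single streaming pass over the raw characters of each transcript: it buffers the current word, emits its index segment at each whitespace boundary, and emits the space index only between words, so str.split(), the per-index loop and the labels[:-1] trim all disappear.
import Mathlib
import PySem

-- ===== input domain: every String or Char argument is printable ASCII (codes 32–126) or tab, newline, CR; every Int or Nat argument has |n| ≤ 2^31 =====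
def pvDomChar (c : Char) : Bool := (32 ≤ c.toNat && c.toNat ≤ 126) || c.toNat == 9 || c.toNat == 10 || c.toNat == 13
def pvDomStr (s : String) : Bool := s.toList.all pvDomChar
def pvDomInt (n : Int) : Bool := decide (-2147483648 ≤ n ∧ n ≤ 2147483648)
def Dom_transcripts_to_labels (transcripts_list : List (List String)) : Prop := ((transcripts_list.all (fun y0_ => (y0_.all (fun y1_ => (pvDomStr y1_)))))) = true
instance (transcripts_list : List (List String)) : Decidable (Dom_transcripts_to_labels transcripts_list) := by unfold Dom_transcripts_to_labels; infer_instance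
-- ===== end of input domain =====

-- B is a single streaming pass over each transcript's characters (buffer the word, emit
-- its segment at whitespace boundaries, space index only between words) instead of A's
-- split-then-encode-then-trim pipeline; same cost, different algorithmic decomposition.

-- ===== PORT A =====
def pvVOCAB : List Char := [' ', '\'', '~', '-', '.', '<', '>', '[', ']', 'U', 'N', 'K',
  'a', 'b', 'c', 'd', 'e', 'f', 'g', 'h', 'i', 'j', 'k', 'l', 'm', 'n', 'o', 'p', 'q',
  'r', 's', 't', 'u', 'v', 'w', 'x', 'y', 'z']

def pvSILENT : List String := ["[baby]", "[ringing]", "[laughter]", "[kids]", "[music]",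
  "[noise]", "[unintelligible]", "[dogs]", "[cough]"]

-- one iteration of A's inner `for i in range(len(words))` loop body (index? .getD 0 is
-- Python's list.index; Pre_ guarantees the element is present, so the default is unreachable)
def pvWordStep (labels : List Int) (word : String) : List Int :=
  if pvSILENT.contains word then
    (labels ++ [((PySem.List.index? pvSILENT word).getD 0 : Int) + 38]) ++
      [((PySem.List.index? pvVOCAB ' ').getD 0 : Int)]
  else
    (labels ++ word.toList.map (fun ch => ((PySem.List.index? pvVOCAB ch).getD 0 : Int))) ++
      [((PySem.List.index? pvVOCAB ' ').getD 0 : Int)]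

def transcripts_to_labels (transcripts_list : List (List String)) : List (List (List Int)) :=
  transcripts_list.map (fun transcripts =>
    transcripts.map (fun transcript =>
      let words := PySem.Str.split₀ transcript
      let labels := words.foldl pvWordStep []
      labels.dropLast))   -- labels[:-1]

-- ===== PORT B =====
-- Source B's _encode_word
def pvEncodeWord (word : String) : List Int :=
  if pvSILENT.contains word then
    [((PySem.List.index? pvSILENT word).getD 0 : Int) + 38]
  else
    word.toList.map (fun ch => ((PySem.List.index? pvVOCAB ch).getD 0 : Int))

def pvSpaceIdx : Int := ((PySem.List.index? pvVOCAB ' ').getD 0 : Int)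

-- Source B's word flush: separator (unless first word), then the word's segment
def pvEmit (labels : List Int) (first : Bool) (cur : List Char) : List Int :=
  (if first then labels else labels ++ [pvSpaceIdx]) ++ pvEncodeWord (String.ofList cur)

-- Source B's streaming char loop: state = (current word buffer, labels so far, first-word flag)
def pvStream : List Char → List Char → List Int → Bool → List Int
  | [], cur, labels, first => if cur.isEmpty then labels else pvEmit labels first cur
  | c :: rest, cur, labels, first =>
    if PySem.Chars.isspace c then
      if cur.isEmpty then pvStream rest [] labels first
      else pvStream rest [] (pvEmit labels first cur) false
    else pvStream rest (cur ++ [c]) labels first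

def transcripts_to_labels_alt (transcripts_list : List (List String)) : List (List (List Int)) :=
  transcripts_list.map (fun transcripts =>
    transcripts.map (fun transcript => pvStream transcript.toList [] [] true))

-- ===== PRECONDITION & SPEC =====
-- Pre_ excludes exactly the inputs on which Python A raises ValueError: a whitespace-split
-- word that is neither in SILENT_VOCAB nor made only of VOCAB characters.
def Pre_transcripts_to_labels (transcripts_list : List (List String)) : Prop :=
  (transcripts_list.all (fun transcripts => transcripts.all (fun transcript =>
    (PySem.Str.split₀ transcript).all (fun w =>
      pvSILENT.contains w || w.toList.all (fun c => pvVOCAB.contains c))))) = true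
instance (transcripts_list : List (List String)) : Decidable (Pre_transcripts_to_labels transcripts_list) := by unfold Pre_transcripts_to_labels; infer_instance

def pvWitness_transcripts_to_labels : List (List String) := [["[noise] hello world", ""], []]

def Spec_transcripts_to_labels (transcripts_list : List (List String)) (out : List (List (List Int))) : Prop := out = transcripts_to_labels_alt transcripts_list
instance (transcripts_list : List (List String)) (out : List (List (List Int))) : Decidable (Spec_transcripts_to_labels transcripts_list out) := by unfold Spec_transcripts_to_labels; infer_instance

-- ===== CLAIM (what is proved, stated in full; the proofs are below) =====
def Claim_equal_transcripts_to_labels : Prop := ∀ (transcripts_list : List (List String)), Dom_transcripts_to_labels transcripts_list → Pre_transcripts_to_labels transcripts_list → Spec_transcripts_to_labels transcripts_list (transcripts_to_labels transcripts_list)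

-- ===== LEMMAS AND PROOFS =====

-- encoding of a word list with a space index BEFORE every word
def pvT (ws : List String) : List Int :=
  (ws.map (fun w => pvSpaceIdx :: pvEncodeWord w)).flatten

-- encoding of a word list with the space index only BETWEEN words
def pvE : List String → List Int
  | [] => []
  | w :: ws => pvEncodeWord w ++ pvT ws

-- A's loop body appends the word's segment and then a space
theorem pvWordStep_eq (labels : List Int) (word : String) :
    pvWordStep labels word = labels ++ (pvEncodeWord word ++ [pvSpaceIdx]) := by
  unfold pvWordStep pvEncodeWord pvSpaceIdx
  split_ifs <;> simp

-- A's fold flattens the word segments, each followed by a space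
theorem foldA_eq (words : List String) (acc : List Int) :
    words.foldl pvWordStep acc =
      acc ++ (words.map (fun w => pvEncodeWord w ++ [pvSpaceIdx])).flatten := by
  induction words generalizing acc with
  | nil => simp
  | cons w ws ih => simp [List.foldl_cons, pvWordStep_eq, ih, List.append_assoc]

-- A's flattened list, on a nonempty word list, is pvE with one trailing space
theorem flatA_eq (ws : List String) (w : String) :
    ((w :: ws).map (fun w' => pvEncodeWord w' ++ [pvSpaceIdx])).flatten =
      pvE (w :: ws) ++ [pvSpaceIdx] := by
  induction ws generalizing w with
  | nil => simp [pvE, pvT]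
  | cons w1 ws1 ih =>
      rw [List.map_cons, List.flatten_cons, ih w1]
      simp [pvE, pvT, List.append_assoc]

-- A per transcript, via split₀
theorem perA_eq (words : List String) :
    (words.foldl pvWordStep []).dropLast = pvE words := by
  cases words with
  | nil => simp [pvE]
  | cons w ws =>
      rw [foldA_eq, List.nil_append, flatA_eq, List.dropLast_concat]

-- split₀.go's third argument is an already-finished prefix
theorem goAcc (cs : List Char) (rcur : List Char) (acc : List (List Char)) :
    PySem.Chars.split₀.go cs rcur acc = acc.reverse ++ PySem.Chars.split₀.go cs rcur [] := by
  induction cs generalizing rcur acc with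
  | nil =>
      rw [PySem.Chars.split₀.go.eq_def, PySem.Chars.split₀.go.eq_def]
      by_cases h : rcur.isEmpty <;> simp [h]
  | cons c rest ih =>
      rw [PySem.Chars.split₀.go.eq_def]
      conv_rhs => rw [PySem.Chars.split₀.go.eq_def]
      by_cases hs : PySem.Chars.isspace c <;> by_cases hc : rcur.isEmpty <;>
        simp only [hs, hc, if_true, if_false, Bool.false_eq_true] <;>
        [rw [ih]; (rw [ih, ih [] [rcur.reverse]]; simp); rw [ih]; rw [ih]]

-- the streaming loop computes the between-words encoding of the remaining split
theorem stream_eq (cs : List Char) (rcur : List Char) (labels : List Int) (first : Bool) :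
    pvStream cs rcur.reverse labels first =
      labels ++ (if first then pvE else pvT)
        ((PySem.Chars.split₀.go cs rcur []).map String.ofList) := by
  induction cs generalizing rcur labels first with
  | nil =>
      rw [PySem.Chars.split₀.go.eq_def]
      by_cases hc : rcur.isEmpty
      · have : rcur = [] := by cases rcur <;> simp_all
        subst this
        cases first <;> simp [pvStream, pvE, pvT]
      · have hne : rcur.reverse.isEmpty = false := by cases rcur <;> simp_all
        simp only [hc, Bool.false_eq_true, if_false, pvStream, hne]
        cases first <;> simp [pvEmit, pvE, pvT]
  | cons c rest ih =>
      rw [PySem.Chars.split₀.go.eq_def]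
      by_cases hs : PySem.Chars.isspace c
      · by_cases hc : rcur.isEmpty
        · have : rcur = [] := by cases rcur <;> simp_all
          subst this
          simpa [pvStream, hs, hc] using ih [] labels first
        · have hne : rcur.reverse.isEmpty = false := by cases rcur <;> simp_all
          simp only [pvStream, hs, if_true, hne, Bool.false_eq_true, if_false, hc]
          rw [goAcc rest [] [rcur.reverse]]
          have := ih [] (pvEmit labels first rcur.reverse) false
          simp only [List.reverse_nil] at this
          rw [this]
          cases first <;> simp [pvEmit, pvE, pvT, List.append_assoc]
      · have : rcur.reverse ++ [c] = (c :: rcur).reverse := by simp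
        simp only [pvStream, hs, Bool.false_eq_true, if_false, this]
        exact ih (c :: rcur) labels first

-- B per transcript equals A per transcript
theorem perB_eq (t : String) :
    pvStream t.toList [] [] true = pvE (PySem.Str.split₀ t) := by
  have := stream_eq t.toList [] [] true
  simp only [List.reverse_nil, List.nil_append, if_true] at this
  rw [this, PySem.Str.split₀, PySem.Chars.split₀]

-- ===== VERDICT (by name: the statement is the Claim_ definition above) =====
theorem transcripts_to_labels_spec : Claim_equal_transcripts_to_labels := by
  intro tl _ _
  unfold Spec_transcripts_to_labels transcripts_to_labels transcripts_to_labels_alt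
  simp only []
  refine List.map_congr_left (fun ts _ => List.map_congr_left (fun t _ => ?_))
  rw [perB_eq, perA_eq]
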